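-- pv_equiv track=rewrite | github.com/afewell/afewell.github.io | scratch/environments/my_idem_env/lib/python3.9/site-packages/idem_aws/tool/aws/tag_utils.py | diff_tags_dict
-- ===== SOURCE A (Python) =====
-- import copy
-- from typing import Any
-- from typing import Dict
-- from typing import Tuple
--
-- def diff_tags_dict(hub, old_tags: Dict[str, Any], new_tags: Dict[str, Any]) -> Tuple:
--     """
--
--     Args:
--         hub:
--         old_tags:
--         new_tags:
--
--     Returns:
--
--     """
--     tags_to_add = {}
--     tags_to_remove = {}
--     new_tags = copy.deepcopy(new_tags)
--     if old_tags is None: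
--         old_tags = {}
--     if new_tags is None:
--         new_tags = {}
--     for key, value in old_tags.items():
--         if key in new_tags:
--             if old_tags[key] != new_tags[key]:
--                 tags_to_remove.update({key: old_tags[key]})
--                 tags_to_add.update({key: new_tags[key]})
--             new_tags.pop(key)
--         else:
--             tags_to_remove.update({key: old_tags[key]})
--     tags_to_add.update(new_tags)
--     return tags_to_remove, tags_to_add
-- ===== SOURCE B (Python) =====
-- def diff_tags_dict(hub, old_tags, new_tags):
--     """Non-mutating rewrite: no deepcopy, no pop loop — the two result dicts are
--     built by independent filtered comprehensions over the two inputs."""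
--     old = old_tags if old_tags is not None else {}
--     new = new_tags if new_tags is not None else {}
--     tags_to_remove = {k: v for k, v in old.items() if k not in new or new[k] != v}
--     changed = {k: new[k] for k, v in old.items() if k in new and new[k] != v}
--     new_only = {k: v for k, v in new.items() if k not in old}
--     return tags_to_remove, {**changed, **new_only}
-- ===== Notes on version B (the rewrite author's own statement) =====
-- stated objective: simpler
-- what changed: Replaces A's deepcopy plus single mutate-and-pop loop (which interleaves building both results while destroying the new_tags copy) by three independent non-mutating filtered comprehensions over the two input dicts, merged at the end.
import Mathlib
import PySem

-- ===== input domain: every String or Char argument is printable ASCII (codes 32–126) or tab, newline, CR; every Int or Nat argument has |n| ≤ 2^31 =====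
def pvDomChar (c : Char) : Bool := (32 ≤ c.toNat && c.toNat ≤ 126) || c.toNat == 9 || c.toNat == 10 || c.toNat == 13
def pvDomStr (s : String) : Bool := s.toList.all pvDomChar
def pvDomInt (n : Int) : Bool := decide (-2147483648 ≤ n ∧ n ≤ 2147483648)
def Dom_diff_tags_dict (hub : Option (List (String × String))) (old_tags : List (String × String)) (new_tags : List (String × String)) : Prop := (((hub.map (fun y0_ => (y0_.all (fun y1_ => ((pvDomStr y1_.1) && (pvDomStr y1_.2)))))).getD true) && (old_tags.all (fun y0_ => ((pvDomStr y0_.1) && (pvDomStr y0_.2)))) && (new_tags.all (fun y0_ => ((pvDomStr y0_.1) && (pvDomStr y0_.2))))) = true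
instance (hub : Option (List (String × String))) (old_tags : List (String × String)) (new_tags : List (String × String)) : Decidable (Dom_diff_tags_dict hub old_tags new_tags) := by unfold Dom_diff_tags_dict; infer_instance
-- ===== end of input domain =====

-- B replaces A's deepcopy + mutate-and-pop loop by independent filtered passes over the two
-- input dicts (simpler, non-mutating); equivalence is proved for dict-representing inputs
-- (association lists with distinct keys).

-- ===== PORT A =====
-- A-side helper: the body of A's for-loop over old_tags.items(), on the state
-- (tags_to_remove, tags_to_add, mutated copy of new_tags); old_tags[key] / new_tags[key]
-- are ported as getD with a dummy default "" (neither lookup can miss in A: the key comes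
-- from old_tags.items() resp. was just checked with `in`).
def stepA (old_d : PySem.Dict String String)
    (s : PySem.Dict String String × PySem.Dict String String × PySem.Dict String String)
    (kv : String × String) :
    PySem.Dict String String × PySem.Dict String String × PySem.Dict String String :=
  if s.2.2.contains kv.1 then
    if old_d.getD kv.1 "" != s.2.2.getD kv.1 "" then
      (s.1.insert kv.1 (old_d.getD kv.1 ""), s.2.1.insert kv.1 (s.2.2.getD kv.1 ""),
       s.2.2.erase kv.1)
    else (s.1, s.2.1, s.2.2.erase kv.1)
  else (s.1.insert kv.1 (old_d.getD kv.1 ""), s.2.1, s.2.2)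


def diff_tags_dict (hub : Option (List (String × String))) (old_tags : List (String × String)) (new_tags : List (String × String)) : (List (String × String)) × (List (String × String)) :=
  let old_d : PySem.Dict String String := PySem.Dict.mk old_tags
  -- new_tags = copy.deepcopy(new_tags) is the third state component; the `is None`
  -- branches are vacuous under the list convention (a dict argument is always a list here)
  let res := old_tags.foldl (stepA old_d)
    (PySem.Dict.mk [], PySem.Dict.mk [], PySem.Dict.mk new_tags)
  (res.1.items, (res.2.1.update res.2.2.items).items)

-- ===== PORT B =====
def diff_tags_dict_alt (hub : Option (List (String × String))) (old_tags : List (String × String)) (new_tags : List (String × String)) : (List (String × String)) × (List (String × String)) :=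
  let old_d : PySem.Dict String String := PySem.Dict.mk old_tags
  let new_d : PySem.Dict String String := PySem.Dict.mk new_tags
  -- the three dict comprehensions (their key lists inherit distinctness from the sources)
  let tags_to_remove := old_tags.filter (fun kv => !new_d.contains kv.1 || new_d.getD kv.1 "" != kv.2)
  let changed := old_tags.filterMap (fun kv =>
      if new_d.contains kv.1 && new_d.getD kv.1 "" != kv.2 then some (kv.1, new_d.getD kv.1 "") else none)
  let new_only := new_tags.filter (fun kv => !old_d.contains kv.1)
  -- {**changed, **new_only}
  (tags_to_remove, ((PySem.Dict.mk changed).update new_only).items)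

-- ===== PRECONDITION & SPEC =====
-- Pre_ excludes association lists with duplicate keys: they do not correspond to any Python
-- dict argument (the list→dict coercion collapses them), so A's source defines no behaviour there.
def Pre_diff_tags_dict (hub : Option (List (String × String))) (old_tags : List (String × String)) (new_tags : List (String × String)) : Prop :=
  (old_tags.map Prod.fst).Nodup ∧ (new_tags.map Prod.fst).Nodup
instance (hub : Option (List (String × String))) (old_tags : List (String × String)) (new_tags : List (String × String)) : Decidable (Pre_diff_tags_dict hub old_tags new_tags) := by unfold Pre_diff_tags_dict; infer_instance
def pvWitness_diff_tags_dict : (Option (List (String × String))) × (List (String × String)) × (List (String × String)) :=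
  (some [("e", "n")], [("a", "1"), ("b", "2")], [("b", "3"), ("c", "4")])
def Spec_diff_tags_dict (hub : Option (List (String × String))) (old_tags : List (String × String)) (new_tags : List (String × String)) (out : (List (String × String)) × (List (String × String))) : Prop := out = diff_tags_dict_alt hub old_tags new_tags
instance (hub : Option (List (String × String))) (old_tags : List (String × String)) (new_tags : List (String × String)) (out : (List (String × String)) × (List (String × String))) : Decidable (Spec_diff_tags_dict hub old_tags new_tags out) := by unfold Spec_diff_tags_dict; infer_instance

-- ===== CLAIM (what is proved, stated in full; the proofs are below) =====
def Claim_equal_diff_tags_dict : Prop := ∀ (hub : Option (List (String × String))) (old_tags : List (String × String)) (new_tags : List (String × String)), Dom_diff_tags_dict hub old_tags new_tags → Pre_diff_tags_dict hub old_tags new_tags → Spec_diff_tags_dict hub old_tags new_tags (diff_tags_dict hub old_tags new_tags)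

-- ===== LEMMAS AND PROOFS =====
theorem get?_erase_of_bne (d : PySem.Dict String String) (k k' : String)
    (h : (k' == k) = false) : (d.erase k).get? k' = d.get? k' := by
  obtain ⟨items⟩ := d
  induction items with
  | nil => rfl
  | cons p t ih =>
    simp only [PySem.Dict.erase, PySem.Dict.get?] at *
    by_cases hpk : (p.1 == k) = true
    · have hne : (p.1 == k') = false := by
        have := beq_iff_eq.mp hpk; subst this
        simpa [BEq.comm] using h
      simp [hpk, hne] at *
      exact ih
    · simp only [Bool.not_eq_true] at hpk
      by_cases hpk' : (p.1 == k') = true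
      · simp [hpk, hpk']
      · simp only [Bool.not_eq_true] at hpk'
        simp [hpk, hpk'] at *
        exact ih

theorem loopA (old_d new_d : PySem.Dict String String)
    (l : List (String × String)) (rem add nd : PySem.Dict String String)
    (hold : ∀ kv ∈ l, old_d.getD kv.1 "" = kv.2)
    (hnd : ∀ kv ∈ l, nd.get? kv.1 = new_d.get? kv.1)
    (hrem : ∀ kv ∈ l, rem.contains kv.1 = false)
    (hadd : ∀ kv ∈ l, add.contains kv.1 = false)
    (hker : (l.map Prod.fst).Nodup) :
    l.foldl (stepA old_d) (rem, add, nd) =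
      (PySem.Dict.mk (rem.items ++ l.filter (fun kv => !new_d.contains kv.1 || new_d.getD kv.1 "" != kv.2)),
       PySem.Dict.mk (add.items ++ l.filterMap (fun kv =>
         if new_d.contains kv.1 && new_d.getD kv.1 "" != kv.2 then some (kv.1, new_d.getD kv.1 "") else none)),
       PySem.Dict.mk (nd.items.filter (fun p => l.all (fun kv => !(p.1 == kv.1))))) := by
  induction l generalizing rem add nd with
  | nil => simp
  | cons kv t ih =>
    have hkv2 : old_d.getD kv.1 "" = kv.2 := hold kv (by simp)
    have hget : nd.get? kv.1 = new_d.get? kv.1 := hnd kv (by simp)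
    have hcont : nd.contains kv.1 = new_d.contains kv.1 := by
      rw [PySem.Dict.contains_eq_isSome_get?, PySem.Dict.contains_eq_isSome_get?, hget]
    have hgetD : nd.getD kv.1 "" = new_d.getD kv.1 "" := by
      simp [PySem.Dict.getD, hget]
    have hkeys : ∀ p ∈ t, (p.1 == kv.1) = false := by
      intro p hp
      have h1 : kv.1 ∉ t.map Prod.fst := (List.nodup_cons.mp (by simpa using hker)).1
      have : p.1 ≠ kv.1 := fun he => h1 (he ▸ List.mem_map_of_mem hp)
      simpa using this
    have hkert : (t.map Prod.fst).Nodup := (List.nodup_cons.mp (by simpa using hker)).2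
    have hndt : ∀ p ∈ t, ∀ (d : PySem.Dict String String),
        (d.erase kv.1).get? p.1 = d.get? p.1 := fun p hp d =>
      get?_erase_of_bne d kv.1 p.1 (hkeys p hp)
    have holdt : ∀ p ∈ t, old_d.getD p.1 "" = p.2 := fun p hp => hold p (by simp [hp])
    have hremt : ∀ p ∈ t, rem.contains p.1 = false := fun p hp => hrem p (by simp [hp])
    have haddt : ∀ p ∈ t, add.contains p.1 = false := fun p hp => hadd p (by simp [hp])
    cases hcv : nd.contains kv.1 with
    | true =>
      have hc' : new_d.contains kv.1 = true := hcont ▸ hcv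
      cases hnev : (old_d.getD kv.1 "" != nd.getD kv.1 "") with
      | true =>
        have hvne : new_d.getD kv.1 "" ≠ kv.2 := by
          rw [← hgetD, ← hkv2]; intro h; simp [h] at hnev
        have hstep : stepA old_d (rem, add, nd) kv =
            (rem.insert kv.1 (old_d.getD kv.1 ""), add.insert kv.1 (nd.getD kv.1 ""),
             nd.erase kv.1) := by
          simp [stepA, hcv, hnev]
        rw [List.foldl_cons, hstep,
          ih _ _ _ holdt (fun p hp => (hndt p hp nd).trans (hnd p (by simp [hp])))
            (fun p hp => by rw [PySem.Dict.contains_insert]; simp [hkeys p hp, hremt p hp])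
            (fun p hp => by rw [PySem.Dict.contains_insert]; simp [hkeys p hp, haddt p hp])
            hkert]
        refine Prod.ext ?_ (Prod.ext ?_ ?_) <;> simp only
        · congr 1
          rw [PySem.Dict.items_insert_of_not_contains _ _ (hrem kv (by simp))]
          simp [hc', hvne, hkv2]
        · congr 1
          rw [PySem.Dict.items_insert_of_not_contains _ _ (hadd kv (by simp))]
          simp [hc', hvne, hgetD]
        · congr 1
          simp only [PySem.Dict.erase, List.filter_filter]
          apply List.filter_congr
          intro p hp
          simp [List.all_cons, Bool.and_comm]
      | false =>
        have hveq : new_d.getD kv.1 "" = kv.2 := by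
          rw [← hgetD, ← hkv2]
          have h : old_d.getD kv.1 "" = nd.getD kv.1 "" := by simpa using hnev
          exact h.symm
        have hstep : stepA old_d (rem, add, nd) kv = (rem, add, nd.erase kv.1) := by
          simp [stepA, hcv, hnev]
        rw [List.foldl_cons, hstep,
          ih _ _ _ holdt (fun p hp => (hndt p hp nd).trans (hnd p (by simp [hp])))
            hremt haddt hkert]
        refine Prod.ext ?_ (Prod.ext ?_ ?_) <;> simp only
        · congr 1
          simp [hc', hveq]
        · congr 1
          simp [hc', hveq]
        · congr 1
          simp only [PySem.Dict.erase, List.filter_filter]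
          apply List.filter_congr
          intro p hp
          simp [List.all_cons, Bool.and_comm]
    | false =>
      have hc' : new_d.contains kv.1 = false := hcont ▸ hcv
      have hstep : stepA old_d (rem, add, nd) kv =
          (rem.insert kv.1 (old_d.getD kv.1 ""), add, nd) := by
        simp [stepA, hcv]
      rw [List.foldl_cons, hstep,
        ih _ _ _ holdt (fun p hp => hnd p (by simp [hp]))
          (fun p hp => by rw [PySem.Dict.contains_insert]; simp [hkeys p hp, hremt p hp])
          haddt hkert]
      refine Prod.ext ?_ (Prod.ext ?_ ?_) <;> simp only
      · congr 1
        rw [PySem.Dict.items_insert_of_not_contains _ _ (hrem kv (by simp))]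
        simp [hc', hkv2]
      · congr 1
        simp [hc']
      · congr 1
        apply List.filter_congr
        intro p hp
        have : (p.1 == kv.1) = false := by
          have h0 := hcv
          simp [PySem.Dict.contains] at h0
          simpa using h0 p.1 p.2 hp
        simp [List.all_cons, this]

-- for p a key of new_tags: `k not in old` (B) says the same as `k never popped` (A's leftover)
theorem all_bne_eq_not_any (old : List (String × String)) (a : String) :
    (old.all fun kv => !(a == kv.1)) = !(old.any fun q => q.1 == a) := by
  induction old with
  | nil => rfl
  | cons q t ih => simp [List.all_cons, List.any_cons, ih, BEq.comm]

-- ===== VERDICT (by name: the statement is the Claim_ definition above) =====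
theorem diff_tags_dict_spec : Claim_equal_diff_tags_dict := by
  intro hub old new _ hpre
  obtain ⟨hno, _⟩ := hpre
  unfold Spec_diff_tags_dict
  show diff_tags_dict hub old new = diff_tags_dict_alt hub old new
  simp only [diff_tags_dict, diff_tags_dict_alt]
  have hold : ∀ kv ∈ old, (PySem.Dict.mk old).getD kv.1 "" = kv.2 := by
    intro kv hkv
    exact PySem.Dict.getD_of_mem_items (PySem.Dict.mk old) (by simpa using hkv) (by simpa using hno) ""
  rw [loopA (PySem.Dict.mk old) (PySem.Dict.mk new) old
        (PySem.Dict.mk []) (PySem.Dict.mk []) (PySem.Dict.mk new)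
        hold (fun _ _ => rfl) (fun _ _ => rfl) (fun _ _ => rfl) hno]
  refine Prod.ext (by simp) ?_
  simp only [List.nil_append]
  congr 2
  apply List.filter_congr
  intro p _
  exact all_bne_eq_not_any old p.1
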